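-- pv_equiv track=rewrite | github.com/turingtei/Python_Tutorial | lesson_5a_06.py | removeLastOdd
-- ===== SOURCE A (Python) =====
-- def removeLastOdd(numbers):
--   oddIndex = []
--   hasOdd = False
--   oddNumber = 0
--   for i in range(len(numbers)):
--     if numbers[i] % 2 == 1:
--       hasOdd = True
--       oddIndex.append(i)
--   if hasOdd:
--     numbers.pop(oddIndex[-1])
--   return numbers
-- ===== SOURCE B (Python) =====
-- def removeLastOdd(numbers):
--   for i in range(len(numbers) - 1, -1, -1):
--     if numbers[i] % 2 == 1:
--       numbers.pop(i)
--       break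
--   return numbers
-- ===== Notes on version B (the rewrite author's own statement) =====
-- stated objective: simpler
-- what changed: B scans the list once from the right and pops the first odd element it meets (stopping there), instead of collecting the list of all odd indices in a full forward pass and then popping the last collected index.
import Mathlib
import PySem

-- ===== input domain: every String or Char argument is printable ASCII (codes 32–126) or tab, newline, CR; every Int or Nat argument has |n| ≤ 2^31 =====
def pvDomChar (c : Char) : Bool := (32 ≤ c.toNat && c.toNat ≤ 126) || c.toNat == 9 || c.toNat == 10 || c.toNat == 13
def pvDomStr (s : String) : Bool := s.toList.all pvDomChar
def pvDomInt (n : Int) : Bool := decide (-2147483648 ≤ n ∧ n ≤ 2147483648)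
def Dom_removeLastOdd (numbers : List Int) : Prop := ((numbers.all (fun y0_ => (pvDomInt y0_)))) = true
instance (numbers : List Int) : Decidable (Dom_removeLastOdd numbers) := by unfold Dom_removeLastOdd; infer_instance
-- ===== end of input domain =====

-- B removes the last odd element by a single right-to-left scan with an early stop, instead of
-- A's forward pass that collects every odd index and then pops the last one (simpler).
-- Both Pythons mutate `numbers` in place identically (they pop the same index) and return it.

-- ===== PORT A =====
def removeLastOdd (numbers : List Int) : List Int :=
  let st := (PySem.List.pyRange 0 (numbers.length : Int) 1).foldl
    (fun (st : List Int × Bool) i =>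
      if PySem.Int.mod (PySem.List.pyGetD numbers i 0) 2 = 1 then (st.1 ++ [i], true) else st)
    ([], false)
  if st.2 then
    match PySem.List.pop? numbers (PySem.List.pyGetD st.1 (-1) 0) with
    | some r => r.2
    | none => numbers   -- unreachable: oddIndex[-1] is always a valid index when hasOdd
  else numbers

-- ===== PORT B =====
-- the `for … in range(len(numbers)-1, -1, -1)` loop with its early `break`
def removeLastOddGo (numbers : List Int) : List Int → List Int
  | [] => numbers
  | i :: rest =>
    if PySem.Int.mod (PySem.List.pyGetD numbers i 0) 2 = 1 then
      match PySem.List.pop? numbers i with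
      | some r => r.2
      | none => numbers   -- unreachable: i is always in range
    else removeLastOddGo numbers rest

def removeLastOdd_alt (numbers : List Int) : List Int :=
  removeLastOddGo numbers (PySem.List.pyRange ((numbers.length : Int) - 1) (-1) (-1))

-- ===== PRECONDITION & SPEC =====
def Spec_removeLastOdd (numbers : List Int) (out : List Int) : Prop := out = removeLastOdd_alt numbers
instance (numbers : List Int) (out : List Int) : Decidable (Spec_removeLastOdd numbers out) := by
  unfold Spec_removeLastOdd; infer_instance

-- ===== CLAIM =====
def Claim_equal_removeLastOdd : Prop :=
  ∀ (numbers : List Int), Dom_removeLastOdd numbers → Spec_removeLastOdd numbers (removeLastOdd numbers)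

-- ===== LEMMAS AND PROOFS =====

-- the odd-test both programs use, read at a Nat index
def pvOddAt (xs : List Int) (k : Nat) : Bool := PySem.Int.mod (xs.getD k 0) 2 == 1

-- the common reference value: erase at the greatest odd index below m (if any)
def pvTarget (xs : List Int) (m : Nat) : List Int :=
  match ((List.range m).filter (fun k => pvOddAt xs k)).reverse with
  | [] => xs
  | j :: _ => xs.eraseIdx j

theorem pvB_go (xs : List Int) : ∀ (m : Nat), m ≤ xs.length →
    removeLastOddGo xs (PySem.List.pyRange ((m : Int) - 1) (-1) (-1)) = pvTarget xs m := by
  intro m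
  induction m with
  | zero =>
    intro _
    rw [PySem.List.pyRange_neg_one_eq_nil (by omega)]
    simp [removeLastOddGo, pvTarget]
  | succ m ih =>
    intro hm
    rw [show ((m + 1 : Nat) : Int) - 1 = ((m : Nat) : Int) by push_cast; ring]
    rw [PySem.List.pyRange_neg_one_cons (by omega)]
    have hlt : m < xs.length := by omega
    by_cases hodd : pvOddAt xs m = true
    · have hif : PySem.Int.mod (PySem.List.pyGetD xs ((m : Nat) : Int) 0) 2 = 1 := by
        simpa [pvOddAt] using hodd
      simp only [removeLastOddGo, hif, if_pos]
      rw [PySem.List.pop?_natCast xs m hlt]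
      simp [pvTarget, List.range_succ, List.filter_append, hodd]
    · have hne : ¬ PySem.Int.mod (PySem.List.pyGetD xs ((m : Nat) : Int) 0) 2 = 1 := by
        simpa [pvOddAt] using hodd
      simp only [removeLastOddGo, hne, if_false]
      rw [ih (by omega)]
      simp [pvTarget, List.range_succ, List.filter_append, hodd]

theorem pvA_fold (xs : List Int) : ∀ (m : Nat),
    (PySem.List.pyRange 0 ((m : Nat) : Int) 1).foldl
      (fun (st : List Int × Bool) i =>
        if PySem.Int.mod (PySem.List.pyGetD xs i 0) 2 = 1 then (st.1 ++ [i], true) else st)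
      ([], false)
    = (((List.range m).filter (fun k => pvOddAt xs k)).map (fun k => ((k : Nat) : Int)),
       !((List.range m).filter (fun k => pvOddAt xs k)).isEmpty) := by
  intro m
  induction m with
  | zero =>
    rw [PySem.List.pyRange_one_eq_nil (by omega)]
    simp
  | succ m ih =>
    rw [show ((m + 1 : Nat) : Int) = ((m : Nat) : Int) + 1 by push_cast; ring]
    rw [PySem.List.pyRange_one_succ_right (by omega), List.foldl_append, ih]
    simp only [List.foldl_cons, List.foldl_nil]
    by_cases hodd : pvOddAt xs m = true
    · have hif : PySem.Int.mod (PySem.List.pyGetD xs ((m : Nat) : Int) 0) 2 = 1 := by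
        simpa [pvOddAt] using hodd
      rw [if_pos hif]
      simp [List.range_succ, List.filter_append, hodd]
    · have hne : ¬ PySem.Int.mod (PySem.List.pyGetD xs ((m : Nat) : Int) 0) 2 = 1 := by
        simpa [pvOddAt] using hodd
      rw [if_neg hne]
      simp [List.range_succ, List.filter_append, hodd]

-- ===== VERDICT =====
theorem removeLastOdd_spec : Claim_equal_removeLastOdd := by
  intro xs _
  unfold Spec_removeLastOdd removeLastOdd removeLastOdd_alt
  rw [pvB_go xs xs.length le_rfl]
  rw [pvA_fold xs xs.length]
  set l := (List.range xs.length).filter (fun k => pvOddAt xs k) with hl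
  unfold pvTarget
  rw [← hl]
  cases hrev : l.reverse with
  | nil =>
    have hnil : l = [] := by simpa using congrArg List.reverse hrev
    simp [hnil]
  | cons j t =>
    have hlne : l ≠ [] := by
      intro h; rw [h] at hrev; simp at hrev
    have hmapne : l.map (fun k => ((k : Nat) : Int)) ≠ [] := by simpa using hlne
    have hjl : j ∈ l := by
      have : j ∈ l.reverse := by rw [hrev]; exact List.mem_cons_self
      simpa using this
    have hjlt : j < xs.length := by
      have : j ∈ List.range xs.length := List.mem_of_mem_filter hjl
      exact List.mem_range.mp this
    have hisEmpty : l.isEmpty = false := by simpa [List.isEmpty_iff] using hlne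
    simp only [hisEmpty, Bool.not_false, if_true]
    rw [PySem.List.pyGetD_neg_one _ _ hmapne]
    have hgl : (l.map (fun k => ((k : Nat) : Int))).getLast hmapne = ((j : Nat) : Int) := by
      simp [List.getLast_eq_head_reverse, ← List.map_reverse, hrev]
    rw [hgl, PySem.List.pop?_natCast xs j hjlt]
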